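-- pv_equiv track=rewrite | github.com/jfgf11/Problema-Especial | metodos.py | crear_folds
-- ===== SOURCE A (Python) =====
-- def crear_folds(numero_audios, numero_folds):
--     base_audios = int(numero_audios / numero_folds)
--     numero_bases_con_un_audio_mas = numero_audios % numero_folds
--     audios = [0]
--     cuenta = 0
--     for i in range(numero_folds):
--         if i < numero_bases_con_un_audio_mas:
--             cuenta += base_audios + 1
--             audios.append(cuenta)
--         else:
--             cuenta += base_audios
--             audios.append(cuenta)
--     return audios
-- ===== SOURCE B (Python) =====
-- def crear_folds(numero_audios, numero_folds):
--     base = int(numero_audios / numero_folds)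
--     r = numero_audios % numero_folds
--     return [0] + [base * k + max(0, min(k, r)) for k in range(1, numero_folds + 1)]
-- ===== Notes on version B (the rewrite author's own statement) =====
-- stated objective: simpler
-- what changed: replaces the running-accumulator loop that appends each cumulative boundary with a closed-form per-index formula base*k + clamp(k, 0, remainder) over range(1, folds+1)
import Mathlib
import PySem

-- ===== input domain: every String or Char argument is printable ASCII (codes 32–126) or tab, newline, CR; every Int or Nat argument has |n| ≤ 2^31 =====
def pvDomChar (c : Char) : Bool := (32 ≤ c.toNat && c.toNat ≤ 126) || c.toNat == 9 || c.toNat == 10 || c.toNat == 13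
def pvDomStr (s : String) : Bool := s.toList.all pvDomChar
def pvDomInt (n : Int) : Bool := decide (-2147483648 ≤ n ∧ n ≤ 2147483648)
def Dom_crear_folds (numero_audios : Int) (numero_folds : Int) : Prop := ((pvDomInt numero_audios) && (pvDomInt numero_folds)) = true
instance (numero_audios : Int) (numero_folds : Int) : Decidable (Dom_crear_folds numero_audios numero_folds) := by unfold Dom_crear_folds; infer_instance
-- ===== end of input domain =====

-- B replaces A's running accumulator with a closed-form boundary per index (objective: simpler).

-- ===== PORT A =====
-- int(a / b): Python true division then int() truncation; on the domain (|a|,|b| ≤ 2^31) the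
-- float quotient rounds/truncates to exactly the truncated integer quotient, i.e. Int.tdiv.
def pvStepA (base r : Int) (st : List Int × Int) (i : Int) : List Int × Int :=
  if i < r then (st.1 ++ [st.2 + (base + 1)], st.2 + (base + 1))
  else (st.1 ++ [st.2 + base], st.2 + base)

def crear_folds (numero_audios : Int) (numero_folds : Int) : List Int :=
  let base_audios := numero_audios.tdiv numero_folds
  let numero_bases_con_un_audio_mas := PySem.Int.mod numero_audios numero_folds
  let st := (PySem.List.pyRange 0 numero_folds 1).foldl
      (pvStepA base_audios numero_bases_con_un_audio_mas) ([0], 0)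
  st.1

-- ===== PORT B =====
def crear_folds_alt (numero_audios : Int) (numero_folds : Int) : List Int :=
  let base := numero_audios.tdiv numero_folds
  let r := PySem.Int.mod numero_audios numero_folds
  [0] ++ (PySem.List.pyRange 1 (numero_folds + 1) 1).map (fun k => base * k + max 0 (min k r))

-- ===== PRECONDITION & SPEC =====
-- Pre_ excludes only numero_folds = 0, where Python A raises ZeroDivisionError.
def Pre_crear_folds (numero_audios : Int) (numero_folds : Int) : Prop := numero_folds ≠ 0
instance (numero_audios : Int) (numero_folds : Int) : Decidable (Pre_crear_folds numero_audios numero_folds) := by unfold Pre_crear_folds; infer_instance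
def pvWitness_crear_folds : Int × Int := (10, 3)
def Spec_crear_folds (numero_audios : Int) (numero_folds : Int) (out : List Int) : Prop := out = crear_folds_alt numero_audios numero_folds
instance (numero_audios : Int) (numero_folds : Int) (out : List Int) : Decidable (Spec_crear_folds numero_audios numero_folds out) := by unfold Spec_crear_folds; infer_instance

-- ===== CLAIM (what is proved, stated in full; the proofs are below) =====
def Claim_equal_crear_folds : Prop := ∀ (numero_audios : Int) (numero_folds : Int), Dom_crear_folds numero_audios numero_folds → Pre_crear_folds numero_audios numero_folds → Spec_crear_folds numero_audios numero_folds (crear_folds numero_audios numero_folds)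

-- ===== LEMMAS AND PROOFS =====

-- Loop invariant: after folding range(0, n) the pair is B's closed-form list and counter.
lemma fold_inv (base r : Int) (n : Int) (hn : 0 ≤ n) :
    (PySem.List.pyRange 0 n 1).foldl (pvStepA base r) ([0], 0)
      = ((0 : Int) :: (PySem.List.pyRange 1 (n + 1) 1).map (fun k => base * k + max 0 (min k r)),
         base * n + max 0 (min n r)) := by
  induction n, hn using Int.le_induction with
  | base =>
      have h0 : PySem.List.pyRange 0 0 1 = [] := PySem.List.pyRange_one_eq_nil le_rfl
      have h1 : PySem.List.pyRange 1 (0 + 1) 1 = [] := PySem.List.pyRange_one_eq_nil (by omega)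
      rw [h0, h1]
      simp
  | succ n hn ih =>
      rw [PySem.List.pyRange_one_succ_right hn, List.foldl_append, ih,
          PySem.List.pyRange_one_succ_right (by omega : (1:Int) ≤ n + 1)]
      simp only [List.foldl_cons, List.foldl_nil, pvStepA, List.map_append, List.map_cons,
        List.map_nil, List.cons_append]
      by_cases h : n < r
      · have h1 : max 0 (min (n + 1) r) = max 0 (min n r) + 1 := by omega
        have e : base * n + max 0 (min n r) + (base + 1)
            = base * (n + 1) + (max 0 (min n r) + 1) := by ring
        rw [if_pos h, h1, e]
      · have h1 : max 0 (min (n + 1) r) = max 0 (min n r) := by omega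
        have e : base * n + max 0 (min n r) + base
            = base * (n + 1) + max 0 (min n r) := by ring
        rw [if_neg h, h1, e]

-- ===== VERDICT (by name: the statement is the Claim_ definition above) =====
theorem crear_folds_spec : Claim_equal_crear_folds := by
  intro a b _ _
  show crear_folds a b = crear_folds_alt a b
  change ((PySem.List.pyRange 0 b 1).foldl (pvStepA (a.tdiv b) (PySem.Int.mod a b)) ([0], 0)).1
    = [0] ++ (PySem.List.pyRange 1 (b + 1) 1).map
        (fun k => a.tdiv b * k + max 0 (min k (PySem.Int.mod a b)))
  by_cases hb : 0 ≤ b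
  · rw [fold_inv _ _ _ hb]
    simp
  · rw [PySem.List.pyRange_one_eq_nil (by omega : b ≤ 0),
        PySem.List.pyRange_one_eq_nil (by omega : b + 1 ≤ 1)]
    simp
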